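-- pv_equiv track=rewrite | github.com/ltphongssvn/cs1090b_HallucinationLegalRAGChatbots | src/lepard_cl_compat.py | analyze_court_distribution
-- ===== SOURCE A (Python) =====
-- from collections import Counter
--
-- def analyze_court_distribution(
--     pairs: list[tuple[int, int]],
--     cl_ids: set[int],
--     court_map: dict[int, str],
-- ) -> dict[str, int]:
--     """Return court_id -> count of UNIQUE matched CL ids (not per-row occurrences).
--
--     Sorted by count descending, then court_id ascending (deterministic tie-break).
--     """
--     if not court_map:
--         return {}
--     matched_ids: set[int] = set()
--     for source_id, dest_id in pairs:
--         if source_id in cl_ids: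
--             matched_ids.add(source_id)
--         if dest_id in cl_ids:
--             matched_ids.add(dest_id)
--     counts: Counter[str] = Counter(court_map[matched_id] for matched_id in matched_ids if matched_id in court_map)
--     return dict(sorted(counts.items(), key=lambda kv: (-kv[1], kv[0])))
-- ===== SOURCE B (Python) =====
-- def analyze_court_distribution(
--     pairs: list[tuple[int, int]],
--     cl_ids: set[int],
--     court_map: dict[int, str],
-- ) -> dict[str, int]:
--     """Sort-then-scan counting instead of A's hash-based set + Counter: collect
--     the court label of every court_map entry whose id is in cl_ids and occurs
--     as an endpoint of some pair (dict keys are unique, so each matched id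
--     contributes exactly once), sort the labels, and run-length-encode the
--     sorted list to get the per-court counts; finally order by (-count, court)."""
--     if not court_map:
--         return {}
--     endpoints = set()
--     for a, b in pairs:
--         endpoints.add(a)
--         endpoints.add(b)
--     labels = sorted(court for cid, court in court_map.items()
--                     if cid in cl_ids and cid in endpoints)
--     items = []
--     k = 0
--     n = len(labels)
--     while k < n:
--         j = k
--         while j < n and labels[j] == labels[k]:
--             j += 1
--         items.append((labels[k], j - k))
--         k = j
--     items.sort(key=lambda kv: (-kv[1], kv[0]))
--     return dict(items)
-- ===== Notes on version B (the rewrite author's own statement) =====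
-- stated objective: alternative
-- what changed: A builds a global matched-id hash set and then counts with a Counter; B counts without any hash tally: it sorts the matched court labels and run-length-encodes the sorted list into (court, count) items before the final (-count, court) sort.
import Mathlib
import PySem

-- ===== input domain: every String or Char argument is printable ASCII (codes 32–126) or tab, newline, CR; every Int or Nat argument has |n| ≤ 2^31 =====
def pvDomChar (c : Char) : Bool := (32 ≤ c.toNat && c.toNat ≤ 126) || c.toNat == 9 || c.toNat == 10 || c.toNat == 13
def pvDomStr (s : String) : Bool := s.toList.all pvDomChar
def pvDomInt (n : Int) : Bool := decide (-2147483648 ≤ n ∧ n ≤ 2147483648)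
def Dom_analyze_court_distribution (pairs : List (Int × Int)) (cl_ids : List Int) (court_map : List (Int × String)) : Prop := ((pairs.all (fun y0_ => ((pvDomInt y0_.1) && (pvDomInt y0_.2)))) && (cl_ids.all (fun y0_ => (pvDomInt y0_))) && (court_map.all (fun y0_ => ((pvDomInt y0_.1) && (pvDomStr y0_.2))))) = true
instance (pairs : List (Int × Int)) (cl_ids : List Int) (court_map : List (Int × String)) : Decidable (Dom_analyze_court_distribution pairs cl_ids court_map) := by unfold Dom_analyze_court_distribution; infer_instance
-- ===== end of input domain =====

-- B replaces A's matched-id hash set + Counter tally with sort-then-run-length-encode counting of the matched court labels; same results, similar cost (objective: alternative).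


-- ===== PORT A =====
-- court_map[id] / 'id in court_map': first-match lookup in the association list encoding the dict
def pvCmGet? (court_map : List (Int × String)) (id : Int) : Option String :=
  (court_map.find? (fun e => e.1 == id)).map (·.2)

-- matched_ids = set(); for source_id, dest_id in pairs: add each component if it is in cl_ids
def pvMatchedIds (pairs : List (Int × Int)) (cl_ids : List Int) : PySem.Set Int :=
  pairs.foldl (fun s p =>
    let s1 := if p.1 ∈ cl_ids then PySem.Set.add s p.1 else s
    if p.2 ∈ cl_ids then PySem.Set.add s1 p.2 else s1) PySem.Set.empty

def analyze_court_distribution (pairs : List (Int × Int)) (cl_ids : List Int) (court_map : List (Int × String)) : List (String × Int) :=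
  if court_map = [] then []
  else
    -- counts = Counter(court_map[m] for m in matched_ids if m in court_map)
    let counts : PySem.Dict String Int :=
      PySem.Dict.counter ((pvMatchedIds pairs cl_ids).filterMap (fun m => pvCmGet? court_map m))
    -- dict(sorted(counts.items(), key=lambda kv: (-kv[1], kv[0])))
    PySem.List.sorted2 counts.items (fun kv => -kv.2) (fun kv => kv.1)

-- ===== PORT B =====
-- endpoints = set(); for a, b in pairs: add both
def pvInPairs (pairs : List (Int × Int)) : PySem.Set Int :=
  pairs.foldl (fun s p => PySem.Set.add (PySem.Set.add s p.1) p.2) PySem.Set.empty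

-- the while/while index loop of Source B: emit (labels[k], j - k) for each maximal run labels[k..j)
-- (the inner 'while labels[j] == labels[k]' advance is the takeWhile/dropWhile split of the tail)
def pvRle : List String → List (String × Int)
  | [] => []
  | c :: rest =>
      (c, ((rest.takeWhile (· == c)).length + 1 : Int)) :: pvRle (rest.dropWhile (· == c))
  termination_by l => l.length
  decreasing_by
    have := List.length_dropWhile_le (· == c) rest
    simp only [List.length_cons]
    omega

def analyze_court_distribution_alt (pairs : List (Int × Int)) (cl_ids : List Int) (court_map : List (Int × String)) : List (String × Int) :=
  if court_map = [] then []
  else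
    -- labels = sorted(court for cid, court in court_map.items() if cid in cl_ids and cid in endpoints)
    let labels := PySem.List.sorted
      ((court_map.filter (fun e => decide (e.1 ∈ cl_ids ∧ e.1 ∈ pvInPairs pairs))).map Prod.snd)
      (fun x => x)
    -- run-length encode the sorted labels, then items.sort(key=lambda kv: (-kv[1], kv[0]))
    PySem.List.sorted2 (pvRle labels) (fun kv => -kv.2) (fun kv => kv.1)

-- ===== PRECONDITION & SPEC =====
-- Pre_ is only the faithful-encoding constraint of the Python signature: cl_ids is a Python set and
-- court_map a Python dict, so their List encodings carry no duplicate elements / keys; it excludes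
-- no input the Python function can actually receive.
def Pre_analyze_court_distribution (pairs : List (Int × Int)) (cl_ids : List Int) (court_map : List (Int × String)) : Prop :=
  cl_ids.Nodup ∧ (court_map.map Prod.fst).Nodup
instance (pairs : List (Int × Int)) (cl_ids : List Int) (court_map : List (Int × String)) : Decidable (Pre_analyze_court_distribution pairs cl_ids court_map) := by unfold Pre_analyze_court_distribution; infer_instance

def pvWitness_analyze_court_distribution : (List (Int × Int)) × List Int × (List (Int × String)) :=
  ([(1, 2), (3, 1)], [1, 2], [(1, "ca9"), (2, "scotus")])

def Spec_analyze_court_distribution (pairs : List (Int × Int)) (cl_ids : List Int) (court_map : List (Int × String)) (out : List (String × Int)) : Prop := out = analyze_court_distribution_alt pairs cl_ids court_map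
instance (pairs : List (Int × Int)) (cl_ids : List Int) (court_map : List (Int × String)) (out : List (String × Int)) : Decidable (Spec_analyze_court_distribution pairs cl_ids court_map out) := by unfold Spec_analyze_court_distribution; infer_instance

-- ===== CLAIM (what is proved, stated in full; the proofs are below) =====
def Claim_equal_analyze_court_distribution : Prop := ∀ (pairs : List (Int × Int)) (cl_ids : List Int) (court_map : List (Int × String)), Dom_analyze_court_distribution pairs cl_ids court_map → Pre_analyze_court_distribution pairs cl_ids court_map → Spec_analyze_court_distribution pairs cl_ids court_map (analyze_court_distribution pairs cl_ids court_map)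

-- ===== LEMMAS AND PROOFS =====

-- sorted2 with keys k1, k2 is sorted with the single lexicographic key (k1, k2)
theorem pv_sorted2_eq_sorted_lex {α : Type} (xs : List α) (k1 : α → Int) (k2 : α → String) :
    PySem.List.sorted2 xs k1 k2 = PySem.List.sorted xs (fun x => toLex (k1 x, k2 x)) := by
  have hb : (fun a b => decide (k1 a < k1 b) || (!decide (k1 b < k1 a) && decide (k2 a < k2 b)))
      = (fun a b => decide ((toLex (k1 a, k2 a) : Lex (Int × String)) < toLex (k1 b, k2 b))) := by
    funext a b
    rcases lt_trichotomy (k1 a) (k1 b) with h | h | h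
    · simp [Prod.Lex.lt_iff, h]
    · simp [Prod.Lex.lt_iff, h]
    · simp [Prod.Lex.lt_iff, not_lt_of_gt h, h]
      exact fun he => absurd he (ne_of_gt h)
  simp only [PySem.List.sorted2, PySem.List.sorted, if_neg (by decide : ¬ (false = true)), hb]

-- the sort key (-count, court) is injective on (court, count) pairs
theorem pv_key_inj : Function.Injective (fun kv : String × Int => (toLex (-kv.2, kv.1) : Lex (Int × String))) := by
  rintro ⟨a1, a2⟩ ⟨b1, b2⟩ h
  have := toLex.injective h
  simp only [Prod.mk.injEq] at this
  obtain ⟨h1, h2⟩ := this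
  exact Prod.ext h2 (by omega)

-- splitting a countP over a duplicate-free list at one element
theorem pv_countP_if (l : List Int) (hnd : l.Nodup) (a : Int) (b : Bool) (Q : Int → Bool)
    (hQa : Q a = false) :
    l.countP (fun x => if x = a then b else Q x)
      = l.countP Q + (if b = true ∧ a ∈ l then 1 else 0) := by
  induction l with
  | nil => simp
  | cons y t ih =>
    rw [List.nodup_cons] at hnd
    obtain ⟨hy, ht⟩ := hnd
    rw [List.countP_cons, List.countP_cons, ih ht]
    by_cases hya : y = a
    · subst hya
      have hna : y ∉ t := hy
      simp only [hQa, List.mem_cons]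
      by_cases hb : b = true <;> simp [hb, hna]
    · simp only [if_neg hya, List.mem_cons]
      have : (a = y) = False := by simp [Ne.symm hya]
      by_cases hb : b = true <;> by_cases hat : a ∈ t <;>
        simp [hb, hat, Ne.symm hya] <;> omega

-- membership in A's matched_ids fold
theorem pv_mem_matchedIds_fold (cl_ids : List Int) (pairs : List (Int × Int))
    (s : PySem.Set Int) (x : Int) :
    x ∈ pairs.foldl (fun s p =>
        let s1 := if p.1 ∈ cl_ids then PySem.Set.add s p.1 else s
        if p.2 ∈ cl_ids then PySem.Set.add s1 p.2 else s1) s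
      ↔ x ∈ s ∨ (x ∈ cl_ids ∧ ∃ p ∈ pairs, p.1 = x ∨ p.2 = x) := by
  induction pairs generalizing s with
  | nil => simp
  | cons p t ih =>
    simp only [List.foldl_cons, ih, List.mem_cons]
    by_cases h1 : p.1 ∈ cl_ids <;> by_cases h2 : p.2 ∈ cl_ids <;>
      simp only [h1, h2, if_pos, if_neg, PySem.Set.mem_add, not_false_iff] <;>
      aesop

-- A's matched_ids set has no duplicates
theorem pv_nodup_matchedIds_fold (cl_ids : List Int) (pairs : List (Int × Int))
    (s : PySem.Set Int) (hs : s.Nodup) :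
    (pairs.foldl (fun s p =>
        let s1 := if p.1 ∈ cl_ids then PySem.Set.add s p.1 else s
        if p.2 ∈ cl_ids then PySem.Set.add s1 p.2 else s1) s).Nodup := by
  induction pairs generalizing s with
  | nil => exact hs
  | cons p t ih =>
    apply ih
    dsimp only
    split_ifs <;> first
      | exact hs
      | exact PySem.Set.nodup_add _ _ hs
      | exact PySem.Set.nodup_add _ _ (PySem.Set.nodup_add _ _ hs)

-- membership in B's endpoints fold
theorem pv_mem_inPairs_fold (pairs : List (Int × Int)) (s : PySem.Set Int) (x : Int) :
    x ∈ pairs.foldl (fun s p => PySem.Set.add (PySem.Set.add s p.1) p.2) s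
      ↔ x ∈ s ∨ ∃ p ∈ pairs, p.1 = x ∨ p.2 = x := by
  induction pairs generalizing s with
  | nil => simp
  | cons p t ih =>
    simp only [List.foldl_cons, ih, PySem.Set.mem_add, List.mem_cons]
    aesop

-- lookup misses when the id is not a key
theorem pv_cmGet_none (rest : List (Int × String)) (a : Int)
    (ha : a ∉ rest.map Prod.fst) : pvCmGet? rest a = none := by
  simp only [pvCmGet?, Option.map_eq_none_iff, List.find?_eq_none]
  intro e he
  simp only [beq_iff_eq]
  intro hcontr
  exact ha (List.mem_map.2 ⟨e, he, hcontr⟩)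

-- the central count: occurrences of court c among A's matched ids equal the number
-- of court_map entries with value c whose key is matched
theorem pv_count_key (matched : List Int) (court_map : List (Int × String)) (c : String)
    (hm : matched.Nodup) (hk : (court_map.map Prod.fst).Nodup)
    (M : Int → Prop) [DecidablePred M] (hmem : ∀ x, x ∈ matched ↔ M x) :
    matched.countP (fun id => pvCmGet? court_map id == some c)
      = court_map.countP (fun e => (e.2 == c) && decide (M e.1)) := by
  induction court_map with
  | nil => simp [pvCmGet?]
  | cons e rest ih =>
    rw [List.map_cons, List.nodup_cons] at hk
    obtain ⟨he, hk⟩ := hk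
    have hrest : pvCmGet? rest e.1 = none := pv_cmGet_none rest e.1 he
    have hcong : matched.countP (fun id => pvCmGet? (e :: rest) id == some c)
        = matched.countP (fun x => if x = e.1 then (e.2 == c) else (pvCmGet? rest x == some c)) := by
      apply List.countP_congr
      intro x _
      by_cases hxe : x = e.1 <;>
        simp [pvCmGet?, hxe, Ne.symm, beq_iff_eq]
    rw [hcong, pv_countP_if matched hm e.1 (e.2 == c) _ (by simp [hrest]), ih hk,
      List.countP_cons]
    congr 1
    by_cases hc : e.2 = c <;> by_cases hM : M e.1 <;>
      simp [hc, hM, hmem e.1]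

-- in a run-break tail every element differs from the run value (needs sortedness)
theorem pv_dropWhile_ne (c : String) (rest : List String)
    (hr : rest.Pairwise (· ≤ ·)) (hle : ∀ x ∈ rest, c ≤ x) :
    ∀ x ∈ rest.dropWhile (· == c), x ≠ c := by
  cases hdw : rest.dropWhile (· == c) with
  | nil => simp
  | cons x0 t =>
    have hhd : ¬ (x0 == c) = true := by
      have := List.head?_dropWhile_not (· == c) rest
      rw [hdw] at this; simpa using this
    have hx0ne : x0 ≠ c := by simpa using hhd
    have hsub : (rest.dropWhile (· == c)).Sublist rest := List.dropWhile_sublist _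
    have hx0mem : x0 ∈ rest := hsub.mem (by rw [hdw]; exact List.mem_cons_self)
    have hcx0 : c < x0 := lt_of_le_of_ne (hle x0 hx0mem) (Ne.symm hx0ne)
    have hp : (x0 :: t).Pairwise (fun a b => a ≤ b) := hdw ▸ hr.sublist hsub
    intro x hx
    rcases List.mem_cons.1 hx with h | h
    · exact h ▸ hx0ne
    · have hx0x : x0 ≤ x := (List.pairwise_cons.1 hp).1 x h
      exact ne_of_gt (lt_of_lt_of_le hcx0 hx0x)

-- run-length encoding of a sorted list: membership characterises (value, multiplicity)
theorem pv_pvRle_mem (Lb : List String) (hs : Lb.Pairwise (· ≤ ·)) (c : String) (n : Int) :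
    (c, n) ∈ pvRle Lb ↔ c ∈ Lb ∧ n = (Lb.count c : Int) := by
  induction Lb using pvRle.induct with
  | case1 => simp [pvRle]
  | case2 a rest ih =>
    have hr : rest.Pairwise (· ≤ ·) := (List.pairwise_cons.1 hs).2
    have hle : ∀ x ∈ rest, a ≤ x := (List.pairwise_cons.1 hs).1
    have hne : ∀ x ∈ rest.dropWhile (· == a), x ≠ a := pv_dropWhile_ne a rest hr hle
    have hsub : (rest.dropWhile (· == a)).Sublist rest := List.dropWhile_sublist _
    have hdwsorted : (rest.dropWhile (· == a)).Pairwise (· ≤ ·) := hr.sublist hsub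
    have ih' := ih hdwsorted
    have hctk : (rest.takeWhile (· == a)).count a = (rest.takeWhile (· == a)).length :=
      List.count_eq_length.2 (fun b hb =>
        ((by simpa using List.mem_takeWhile_imp hb) : b = a).symm)
    have hcda : (rest.dropWhile (· == a)).count a = 0 :=
      List.count_eq_zero.2 (fun h => (hne a h) rfl)
    have hsplit : rest = rest.takeWhile (· == a) ++ rest.dropWhile (· == a) :=
      (List.takeWhile_append_dropWhile ..).symm
    rw [pvRle]
    simp only [List.mem_cons, Prod.mk.injEq]
    by_cases hca : c = a
    · subst hca
      have hcount : (c :: rest).count c = (rest.takeWhile (· == c)).length + 1 := by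
        rw [List.count_cons_self]
        conv_lhs => rw [hsplit]
        rw [List.count_append, hctk, hcda]
      have hnotdw : (c, n) ∉ pvRle (rest.dropWhile (· == c)) := fun h =>
        (hne c (ih'.1 h).1) rfl
      constructor
      · rintro (⟨-, hn⟩ | h)
        · refine ⟨Or.inl rfl, ?_⟩
          rw [hcount]; push_cast; omega
        · exact absurd h hnotdw
      · rintro ⟨-, hn⟩
        refine Or.inl ⟨rfl, ?_⟩
        rw [hcount] at hn; push_cast at hn ⊢; omega
    · have hcta : (rest.takeWhile (· == a)).count c = 0 :=
        List.count_eq_zero.2 (fun h =>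
          hca ((by simpa using List.mem_takeWhile_imp h) : c = a))
      have hcnt : (a :: rest).count c = (rest.dropWhile (· == a)).count c := by
        simp only [List.count_cons]
        rw [if_neg (fun h => hca ((beq_iff_eq.1 h).symm))]
        conv_lhs => rw [hsplit]
        rw [List.count_append, hcta]
        omega
      have hmemiff : c ∈ rest ↔ c ∈ rest.dropWhile (· == a) := by
        constructor
        · intro h
          conv at h => rw [hsplit]
          rcases List.mem_append.1 h with h | h
          · exact absurd ((by simpa using List.mem_takeWhile_imp h) : c = a) hca
          · exact h
        · exact fun h => hsub.mem h
      constructor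
      · rintro (⟨hc, -⟩ | h)
        · exact absurd hc hca
        · obtain ⟨hm, hn⟩ := ih'.1 h
          exact ⟨Or.inr (hmemiff.2 hm), by rw [hcnt]; exact hn⟩
      · rintro ⟨hc, hn⟩
        rcases hc with hc | hc
        · exact absurd hc hca
        · exact Or.inr (ih'.2 ⟨hmemiff.1 hc, by rw [hcnt] at hn; exact hn⟩)

-- run-length encoding of a sorted list has pairwise-distinct keys
theorem pv_pvRle_keys_nodup (Lb : List String) (hs : Lb.Pairwise (· ≤ ·)) :
    ((pvRle Lb).map Prod.fst).Nodup := by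
  induction Lb using pvRle.induct with
  | case1 => simp [pvRle]
  | case2 a rest ih =>
    have hr : rest.Pairwise (· ≤ ·) := (List.pairwise_cons.1 hs).2
    have hle : ∀ x ∈ rest, a ≤ x := (List.pairwise_cons.1 hs).1
    have hne : ∀ x ∈ rest.dropWhile (· == a), x ≠ a := pv_dropWhile_ne a rest hr hle
    have hdwsorted : (rest.dropWhile (· == a)).Pairwise (· ≤ ·) :=
      hr.sublist (List.dropWhile_sublist _)
    rw [pvRle, List.map_cons, List.nodup_cons]
    refine ⟨?_, ih hdwsorted⟩
    intro hmem
    obtain ⟨⟨k, v⟩, hkv, hfst⟩ := List.mem_map.1 hmem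
    have : k ∈ rest.dropWhile (· == a) :=
      ((pv_pvRle_mem _ hdwsorted k v).1 hkv).1
    exact (hne k this) hfst

-- ===== VERDICT (by name: the statement is the Claim_ definition above) =====

theorem analyze_court_distribution_spec : Claim_equal_analyze_court_distribution := by
  intro pairs cl_ids court_map _hdom hpre
  obtain ⟨hcl, hkeys⟩ := hpre
  show analyze_court_distribution pairs cl_ids court_map
      = analyze_court_distribution_alt pairs cl_ids court_map
  unfold analyze_court_distribution analyze_court_distribution_alt
  by_cases hcm : court_map = []
  · simp [hcm]
  · simp only [if_neg hcm]
    -- names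
    set M : Int → Prop := fun x => x ∈ cl_ids ∧ x ∈ pvInPairs pairs with hM
    set L1 : List String := (pvMatchedIds pairs cl_ids).filterMap (fun m => pvCmGet? court_map m) with hL1
    set L2 : List String := (court_map.filter (fun e => decide (M e.1))).map Prod.snd with hL2
    set Lb : List String := PySem.List.sorted L2 (fun x => x) with hLb
    -- matched_ids facts
    have hmem : ∀ x, x ∈ pvMatchedIds pairs cl_ids ↔ M x := by
      intro x
      rw [pvMatchedIds, pv_mem_matchedIds_fold, hM]
      simp only [PySem.Set.empty]
      rw [pvInPairs, pv_mem_inPairs_fold]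
      simp
    have hmnd : (pvMatchedIds pairs cl_ids).Nodup :=
      pv_nodup_matchedIds_fold cl_ids pairs PySem.Set.empty List.nodup_nil
    -- counts agree between A's label multiset and the unsorted label list
    have hcount12 : ∀ c, L1.count c = L2.count c := by
      intro c
      rw [hL1, List.count_filterMap, pv_count_key _ court_map c hmnd hkeys M hmem, hL2,
        List.count, List.countP_map, List.countP_filter]
      rfl
    -- and hence with the sorted labels
    have hcount : ∀ c, L1.count c = Lb.count c := by
      intro c
      rw [hcount12 c, hLb]
      exact ((PySem.List.sorted_perm L2 (fun x => x) false).count_eq c).symm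
    have hsorted : Lb.Pairwise (· ≤ ·) := by
      exact PySem.List.sorted_pairwise (xs := L2) (key := fun x => x)
    -- A's counter items are a permutation of B's run-length encoding
    have hperm : (PySem.Dict.counter L1).items.Perm (pvRle Lb) := by
      rw [PySem.Dict.items_counter]
      have hnd1 : ((PySem.Set.ofList L1).map (fun k => (k, (L1.count k : Int)))).Nodup := by
        refine List.Nodup.of_map Prod.fst ?_
        have : ((PySem.Set.ofList L1).map (fun k => (k, (L1.count k : Int)))).map Prod.fst
            = PySem.Set.ofList L1 := by
          simp [Function.comp_def]
        rw [this]
        exact PySem.Set.nodup_ofList L1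
      have hnd2 : (pvRle Lb).Nodup :=
        List.Nodup.of_map Prod.fst (pv_pvRle_keys_nodup Lb hsorted)
      rw [List.perm_ext_iff_of_nodup hnd1 hnd2]
      rintro ⟨c, n⟩
      rw [pv_pvRle_mem Lb hsorted c n]
      constructor
      · intro h
        obtain ⟨k, hk, hkeq⟩ := List.mem_map.1 h
        obtain ⟨rfl, rfl⟩ : k = c ∧ (L1.count k : Int) = n := by
          simpa using hkeq
        refine ⟨?_, by rw [hcount k]⟩
        rw [← List.count_pos_iff, ← hcount k]
        rw [PySem.Set.mem_ofList] at hk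
        exact List.count_pos_iff.2 hk
      · rintro ⟨hcm', rfl⟩
        refine List.mem_map.2 ⟨c, ?_, by rw [hcount c]⟩
        rw [PySem.Set.mem_ofList, ← List.count_pos_iff, hcount c]
        exact List.count_pos_iff.2 hcm'
    rw [pv_sorted2_eq_sorted_lex, pv_sorted2_eq_sorted_lex]
    exact PySem.List.sorted_eq_sorted_of_perm _ _ _ pv_key_inj hperm
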